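-- pv_equiv track=rewrite | github.com/ClinicalTranslationalBioinformatics/clinical_space_partition | csp/find_predictor_intersections.py | merge_nodes_geometrically_recursion
-- ===== SOURCE A (Python) =====
-- from itertools import combinations
--
-- def merge_nodes_geometrically_recursion(nodes, merge, tag):
--     """
--     Merge nodes recursively according to geometrical restrictions
--     """
--     triangle_lines = ('x_axis' or 'hypotenuse' or 'y_axis')
--     for n1, n2 in combinations(sorted(nodes), 2):
--         if len(nodes[n1] & nodes[n2]) >= 2:
--             tag = True
--             merged = nodes[n1].union(nodes[n2])
--             if (triangle_lines in nodes[n2] and triangle_lines not in nodes[n1]) or len(nodes[n1]) < len(nodes[n2]):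
--                 nodes[n2] = merged
--                 nodes[n1] = set()
--                 merge[n1] = n2
--             else:
--                 nodes[n1] = merged
--                 nodes[n2] = set()
--                 merge[n2] = n1
--             return merge_nodes_geometrically_recursion(nodes, merge, tag)
--     return nodes, merge, tag
-- ===== SOURCE B (Python) =====
-- def _shares_two(sa, sb):
--     return len(sa & sb) >= 2
--
--
-- def _find_mergeable_pair(nodes, keys):
--     for i, a in enumerate(keys):
--         for b in keys[i + 1:]:
--             if _shares_two(nodes[a], nodes[b]):
--                 return (a, b)
--     return None
--
--
-- def _pick_winner(nodes, a, b):
--     if ('x_axis' in nodes[b] and 'x_axis' not in nodes[a]) or len(nodes[a]) < len(nodes[b]):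
--         return b, a
--     return a, b
--
--
-- def merge_nodes_geometrically_recursion(nodes, merge, tag):
--     """
--     Merge nodes iteratively according to geometrical restrictions.
--     """
--     keys = sorted(nodes)  # key set never changes, so sort once
--     while True:
--         pair = _find_mergeable_pair(nodes, keys)
--         if pair is None:
--             return nodes, merge, tag
--         a, b = pair
--         tag = True
--         winner, loser = _pick_winner(nodes, a, b)
--         merged = nodes[a] | nodes[b]
--         nodes[winner] = merged
--         nodes[loser] = set()
--         merge[loser] = winner
-- ===== Notes on version B (the rewrite author's own statement) =====
-- stated objective: idiomatic
-- what changed: Tail recursion replaced by a while-True loop with helper decomposition: the key list is sorted once outside the loop (the key set never changes), the first qualifying pair is found by a nested index scan with a _shares_two helper instead of itertools.combinations, and the two symmetric mutation branches are collapsed into a single winner/loser update path chosen by a _pick_winner helper.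
import Mathlib
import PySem

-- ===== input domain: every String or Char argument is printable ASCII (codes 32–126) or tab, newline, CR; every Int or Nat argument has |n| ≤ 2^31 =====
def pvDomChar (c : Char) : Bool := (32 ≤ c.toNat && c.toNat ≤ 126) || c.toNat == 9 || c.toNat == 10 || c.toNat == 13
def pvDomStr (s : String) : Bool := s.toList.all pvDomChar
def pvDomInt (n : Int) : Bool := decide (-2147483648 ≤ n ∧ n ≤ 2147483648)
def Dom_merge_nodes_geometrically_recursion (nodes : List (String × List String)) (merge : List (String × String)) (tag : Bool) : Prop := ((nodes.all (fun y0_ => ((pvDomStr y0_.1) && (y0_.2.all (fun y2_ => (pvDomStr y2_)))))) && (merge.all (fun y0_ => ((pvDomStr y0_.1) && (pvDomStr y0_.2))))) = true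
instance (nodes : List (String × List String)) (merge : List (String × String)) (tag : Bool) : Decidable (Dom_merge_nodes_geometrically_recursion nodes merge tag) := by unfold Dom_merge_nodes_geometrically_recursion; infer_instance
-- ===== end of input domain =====

-- B replaces A's tail recursion by an iterative loop with a single winner/loser update
-- path: the sorted key list is computed once, the first qualifying pair is
-- found by a nested index scan over that list with a shares-two helper, and the
-- tie-break is factored into a winner/loser selection (objective: idiomatic). Both A and
-- B mutate the nodes/merge dicts in place identically; the proved equivalence is about
-- the returned triple.


-- ===== PORT A =====
-- itertools.combinations(ks, 2) in iteration order
def pvCombs2 : List String → List (String × String)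
  | [] => []
  | x :: xs => xs.map (fun y => (x, y)) ++ pvCombs2 xs

-- A's recursion; the fuel nodes.length+1 is a totality guard only (each recursive call
-- empties one key's set, and an emptied key never qualifies again).
def pvGoA : Nat → PySem.Dict String (List String) → PySem.Dict String String → Bool →
    PySem.Dict String (List String) × PySem.Dict String String × Bool
  | 0, d, m, t => (d, m, t)
  | fuel+1, d, m, t =>
    -- triangle_lines = ('x_axis' or 'hypotenuse' or 'y_axis') evaluates to 'x_axis' in Python
    match (pvCombs2 (PySem.List.sorted d.keys (fun k => k) false)).find?
        (fun p => decide (2 ≤ (PySem.Set.inter (d.getD p.1 []) (d.getD p.2 [])).length)) with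
    | none => (d, m, t)
    | some (n1, n2) =>
      let merged := PySem.Set.union (d.getD n1 []) (d.getD n2 [])
      if (PySem.Set.contains (d.getD n2 []) "x_axis" && !PySem.Set.contains (d.getD n1 []) "x_axis")
          || decide ((d.getD n1 []).length < (d.getD n2 []).length) then
        pvGoA fuel ((d.insert n2 merged).insert n1 []) (m.insert n1 n2) true
      else
        pvGoA fuel ((d.insert n1 merged).insert n2 []) (m.insert n2 n1) true

def merge_nodes_geometrically_recursion (nodes : List (String × List String)) (merge : List (String × String)) (tag : Bool) : (List (String × List String)) × (List (String × String)) × Bool :=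
  let r := pvGoA (nodes.length + 1) (PySem.Dict.ofList nodes) (PySem.Dict.ofList merge) tag
  (r.1.items, r.2.1.items, r.2.2)

-- ===== PORT B =====
-- _shares_two: len(sa & sb) >= 2
def pvSharesTwo (sa sb : List String) : Bool :=
  decide (2 ≤ (PySem.Set.inter sa sb).length)

-- the inner 'for b in keys[i+1:]' scan of _find_mergeable_pair
def pvInnerScan (d : PySem.Dict String (List String)) (a : String) : List String → Option String
  | [] => none
  | b :: bs => if pvSharesTwo (d.getD a []) (d.getD b []) then some b else pvInnerScan d a bs

-- _find_mergeable_pair: first (a, b), a before b in ks, sharing ≥ 2 elements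
def pvFindPair (d : PySem.Dict String (List String)) : List String → Option (String × String)
  | [] => none
  | a :: rest =>
    match pvInnerScan d a rest with
    | some b => some (a, b)
    | none => pvFindPair d rest

-- _pick_winner
def pvPickWinner (d : PySem.Dict String (List String)) (a b : String) : String × String :=
  if (PySem.Set.contains (d.getD b []) "x_axis" && !PySem.Set.contains (d.getD a []) "x_axis")
      || decide ((d.getD a []).length < (d.getD b []).length) then (b, a) else (a, b)

-- B's while-True loop over the once-computed sorted key list ks; same fuel guard as A.
def pvLoopB : Nat → List String → PySem.Dict String (List String) → PySem.Dict String String → Bool →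
    PySem.Dict String (List String) × PySem.Dict String String × Bool
  | 0, _, d, m, t => (d, m, t)
  | fuel+1, ks, d, m, t =>
    match pvFindPair d ks with
    | none => (d, m, t)
    | some (a, b) =>
      let wl := pvPickWinner d a b
      let merged := PySem.Set.union (d.getD a []) (d.getD b [])
      pvLoopB fuel ks ((d.insert wl.1 merged).insert wl.2 []) (m.insert wl.2 wl.1) true

def merge_nodes_geometrically_recursion_alt (nodes : List (String × List String)) (merge : List (String × String)) (tag : Bool) : (List (String × List String)) × (List (String × String)) × Bool :=
  let d := PySem.Dict.ofList nodes
  let ks := PySem.List.sorted d.keys (fun k => k) false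
  let r := pvLoopB (nodes.length + 1) ks d (PySem.Dict.ofList merge) tag
  (r.1.items, r.2.1.items, r.2.2)

-- ===== PRECONDITION & SPEC =====
def Spec_merge_nodes_geometrically_recursion (nodes : List (String × List String)) (merge : List (String × String)) (tag : Bool) (out : (List (String × List String)) × (List (String × String)) × Bool) : Prop := out = merge_nodes_geometrically_recursion_alt nodes merge tag
instance (nodes : List (String × List String)) (merge : List (String × String)) (tag : Bool) (out : (List (String × List String)) × (List (String × String)) × Bool) : Decidable (Spec_merge_nodes_geometrically_recursion nodes merge tag out) := by unfold Spec_merge_nodes_geometrically_recursion; infer_instance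

-- ===== CLAIM (what is proved, stated in full; the proofs are below) =====
def Claim_equal_merge_nodes_geometrically_recursion : Prop := ∀ (nodes : List (String × List String)) (merge : List (String × String)) (tag : Bool), Dom_merge_nodes_geometrically_recursion nodes merge tag → Spec_merge_nodes_geometrically_recursion nodes merge tag (merge_nodes_geometrically_recursion nodes merge tag)

-- ===== LEMMAS AND PROOFS =====

-- A's scan of combinations(ks, 2) finds the same first pair as B's nested scan
theorem pvFind_inner_eq_innerScan (d : PySem.Dict String (List String)) (a : String)
    (rest : List String) :
    rest.find? (fun b => decide (2 ≤ (PySem.Set.inter (d.getD a []) (d.getD b [])).length))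
      = pvInnerScan d a rest := by
  have hpred : (fun b => decide (2 ≤ (PySem.Set.inter (d.getD a []) (d.getD b [])).length))
      = (fun b => pvSharesTwo (d.getD a []) (d.getD b [])) := by
    funext b; rw [pvSharesTwo]
  rw [hpred]
  induction rest with
  | nil => rfl
  | cons b bs ihb =>
    simp only [List.find?_cons, pvInnerScan]
    by_cases h : pvSharesTwo (d.getD a []) (d.getD b []) = true <;> simp [h, ihb]

theorem pvFind_combs_eq_findPair (d : PySem.Dict String (List String)) (ks : List String) :
    (pvCombs2 ks).find?
        (fun p => decide (2 ≤ (PySem.Set.inter (d.getD p.1 []) (d.getD p.2 [])).length))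
      = pvFindPair d ks := by
  induction ks with
  | nil => rfl
  | cons a rest ih =>
    have hcomp : ((fun p : String × String =>
          decide (2 ≤ (PySem.Set.inter (d.getD p.1 []) (d.getD p.2 [])).length)) ∘ (fun y => (a, y)))
        = (fun b => decide (2 ≤ (PySem.Set.inter (d.getD a []) (d.getD b [])).length)) := rfl
    simp only [pvCombs2, pvFindPair, List.find?_append, List.find?_map, hcomp, pvFind_inner_eq_innerScan, ih]
    cases h : pvInnerScan d a rest with
    | some b => rfl
    | none => rfl

theorem pvInnerScan_mem (d : PySem.Dict String (List String)) (a : String) (ks : List String)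
    (b : String) (h : pvInnerScan d a ks = some b) : b ∈ ks := by
  induction ks with
  | nil => simp [pvInnerScan] at h
  | cons x rest ih =>
    simp only [pvInnerScan] at h
    by_cases hc : pvSharesTwo (d.getD a []) (d.getD x []) = true
    · rw [if_pos hc] at h; cases h; exact List.mem_cons_self
    · rw [if_neg hc] at h; exact List.mem_cons_of_mem _ (ih h)

theorem pvFindPair_mem (d : PySem.Dict String (List String)) (ks : List String)
    (a b : String) (h : pvFindPair d ks = some (a, b)) : a ∈ ks ∧ b ∈ ks := by
  induction ks with
  | nil => simp [pvFindPair] at h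
  | cons x rest ih =>
    simp only [pvFindPair] at h
    cases hf : pvInnerScan d x rest with
    | some y =>
      rw [hf] at h
      cases h
      exact ⟨List.mem_cons_self, List.mem_cons_of_mem _ (pvInnerScan_mem _ _ _ _ hf)⟩
    | none =>
      rw [hf] at h
      obtain ⟨h1, h2⟩ := ih h
      exact ⟨List.mem_cons_of_mem _ h1, List.mem_cons_of_mem _ h2⟩

-- overwriting two existing keys does not change the key list
theorem pvKeys_step (d : PySem.Dict String (List String)) (a b : String)
    (ha : a ∈ d.keys) (hb : b ∈ d.keys) (v w : List String) :
    ((d.insert b v).insert a w).keys = d.keys := by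
  have h1 : (d.insert b v).keys = d.keys :=
    PySem.Dict.keys_insert_of_contains d v ((PySem.Dict.contains_iff_mem_keys d b).mpr hb)
  have ha' : (d.insert b v).contains a = true := by
    rw [PySem.Dict.contains_iff_mem_keys, h1]; exact ha
  rw [PySem.Dict.keys_insert_of_contains _ w ha', h1]

theorem pvGoA_eq_loopB (fuel : Nat) :
    ∀ (d : PySem.Dict String (List String)) (m : PySem.Dict String String) (t : Bool)
      (ks : List String), ks = PySem.List.sorted d.keys (fun k => k) false →
      pvGoA fuel d m t = pvLoopB fuel ks d m t := by
  induction fuel with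
  | zero => intro d m t ks _; rfl
  | succ fuel ih =>
    intro d m t ks hks
    simp only [pvGoA, pvLoopB, hks, pvFind_combs_eq_findPair]
    cases h : pvFindPair d (PySem.List.sorted d.keys (fun k => k) false) with
    | none => rfl
    | some p =>
      obtain ⟨a, b⟩ := p
      obtain ⟨ha, hb⟩ := pvFindPair_mem _ _ _ _ h
      rw [PySem.List.mem_sorted] at ha hb
      simp only [pvPickWinner]
      cases hc : (PySem.Set.contains (d.getD b []) "x_axis" && !PySem.Set.contains (d.getD a []) "x_axis")
          || decide ((d.getD a []).length < (d.getD b []).length) with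
      | true =>
        simp only [if_true]
        exact ih _ _ _ _ (by rw [pvKeys_step d a b ha hb])
      | false =>
        simp only [Bool.false_eq_true, if_false]
        exact ih _ _ _ _ (by rw [pvKeys_step d b a hb ha])

-- ===== VERDICT (by name: the statement is the Claim_ definition above) =====
theorem merge_nodes_geometrically_recursion_spec : Claim_equal_merge_nodes_geometrically_recursion := by
  intro nodes merge tag _
  unfold Spec_merge_nodes_geometrically_recursion
  unfold merge_nodes_geometrically_recursion merge_nodes_geometrically_recursion_alt
  rw [pvGoA_eq_loopB _ _ _ _ _ rfl]
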